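-- pv_equiv track=rewrite | github.com/wei2912/idc | nibble_aes/gen_gen_pairs.py | gen_start_active_logic
-- ===== SOURCE A (Python) =====
-- def gen_start_active_logic(start):
--     hex_str = "{:4X}".format(start).replace(" ", "0")
--     lines = []
--     num_active = bin(start).count("1")
--     num_vars = num_active
--
--     lines.append("uint16_t {};".format(
--         ", ".join(
--             "i{}".format(i) for i in range(num_active)
--         )
--     ))
--     for i in range(num_active):
--         lines.append("for (i{0} = 0; i{0} < 16; ++i{0})".format(i) + " {")
--
--     for i in range(4):
--         c = int(hex_str[i])
--
--         if c == 0: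
--             continue
--
--         tmp = c
--         mask = 0
--         for j in range(4):
--             # current bit is 0 indicating passive nibble
--             if tmp % 2 == 0:
--                 mask |= 15 << (4*j)
--             tmp >>= 1
--         line = 'pt[{}] &= {:#x};'.format(i, mask)
--         lines.append(line)
--
--         line = "pt[{}] |= ".format(i)
--         j = num_active - num_vars
--         if c == 1:
--             line += "i{}".format(j)
--             num_vars -= 1
--         elif c == 2:
--             line += "i{} << 4".format(j)
--             num_vars -= 1
--         elif c == 3:
--             line += "(i{} << 4) | i{}".format(j, j+1)
--             num_vars -= 2
--         elif c == 4:
--             line += "i{} << 8".format(j)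
--             num_vars -= 1
--         elif c == 5:
--             line += "(i{} << 8) | i{}".format(j, j+1)
--             num_vars -= 2
--         elif c == 6:
--             line += "(i{} << 8) | (i{} << 4)".format(j, j+1)
--             num_vars -= 2
--         elif c == 7:
--             line += "(i{} << 8) | (i{} << 4) | i{}".format(j, j+1, j+2)
--             num_vars -= 3
--         elif c == 8:
--             line += "i{} << 12".format(j)
--             num_vars -= 1
--         elif c == 9:
--             line += "(i{} << 12) | i{}".format(j, j+1)
--             num_vars -= 2
--         elif c == 10:
--             line += "(i{} << 12) | (i{} << 4)".format(j, j+1)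
--             num_vars -= 2
--         elif c == 11:
--             line += "(i{} << 12) | (i{} << 4) | i{}".format(j, j+1, j+2)
--             num_vars -= 3
--         elif c == 12:
--             line += "(i{} << 12) | (i{} << 8)".format(j, j+1)
--             num_vars -= 2
--         elif c == 13:
--             line += "(i{} << 12) | (i{} << 8) | i{}".format(j, j+1, j+2)
--             num_vars -= 3
--         elif c == 14:
--             line += "(i{} << 12) | (i{} << 8) | (i{} << 4)".format(j, j+1, j+2)
--             num_vars -= 3
--         elif c == 15:
--             line += "(i{} << 12) | (i{} << 8) | (i{} << 4) | i{}".format(j, j+1, j+2, j+3)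
--             num_vars -= 4
--         line += ";"
--         lines.append(line)
--
--     return "\n".join(["    {}".format(line) for line in lines])
-- ===== SOURCE B (Python) =====
-- def gen_start_active_logic(start):
--     # Simpler: per-nibble bit loop replaces A's 15-branch dispatch; same output.
--     hex_str = "{:4X}".format(start).replace(" ", "0")
--     num_active = bin(start).count("1")
--     lines = ["uint16_t {};".format(", ".join("i{}".format(i) for i in range(num_active)))]
--     for i in range(num_active):
--         lines.append("for (i{0} = 0; i{0} < 16; ++i{0})".format(i) + " {")
--     n = 0
--     for i in range(4):
--         c = int(hex_str[i])
--         if c == 0: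
--             continue
--         mask = 0
--         terms = []
--         for p in (3, 2, 1, 0):
--             if (c >> p) & 1:
--                 terms.append((p, n))
--                 n += 1
--             else:
--                 mask |= 15 << (4 * p)
--         lines.append("pt[{}] &= {:#x};".format(i, mask))
--
--         def fmt(p, k):
--             t = "i{}".format(k) if p == 0 else "i{} << {}".format(k, 4 * p)
--             return "({})".format(t) if p > 0 and len(terms) > 1 else t
--
--         lines.append("pt[{}] |= {};".format(i, " | ".join(fmt(p, k) for p, k in terms)))
--     return "\n".join("    {}".format(line) for line in lines)
-- ===== Notes on version B (the rewrite author's own statement) =====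
-- stated objective: simpler
-- what changed: B replaces A's 60-line, 15-branch per-nibble dispatch (and its separate mask loop and num_vars bookkeeping) by one bit loop per nibble that collects shift/index terms, builds the mask from the clear bits, and joins the terms, with a single running variable counter.
-- outside the precondition, e.g. on gen_start_active_logic(15): A raises ValueError, B raises ValueError; on gen_start_active_logic(60): A raises ValueError, B raises ValueError; on gen_start_active_logic(-1): A raises ValueError, B raises ValueError
import Mathlib
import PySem

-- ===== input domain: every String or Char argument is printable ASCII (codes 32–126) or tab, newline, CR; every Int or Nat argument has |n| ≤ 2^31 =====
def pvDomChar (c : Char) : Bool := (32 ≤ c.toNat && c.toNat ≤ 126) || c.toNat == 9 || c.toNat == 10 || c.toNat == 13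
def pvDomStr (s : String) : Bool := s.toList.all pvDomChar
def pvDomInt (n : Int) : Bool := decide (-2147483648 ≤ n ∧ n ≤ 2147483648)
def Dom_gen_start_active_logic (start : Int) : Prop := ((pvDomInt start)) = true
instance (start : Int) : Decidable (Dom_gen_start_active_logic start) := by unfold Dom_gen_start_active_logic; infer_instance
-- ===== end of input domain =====

-- B replaces A's 15-branch per-nibble dispatch by a single bit loop; objective: simpler, same output.

-- shared formatting helpers (both Pythons use the same "{:4X}", bin(), "{}".format and "{:#x}" machinery)
-- hex nibbles of n, most significant first (fuel-bounded; fuel n+1 always suffices)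
def pvNibsAux : Nat → Nat → List Nat
  | 0, _ => []
  | f+1, n => if n = 0 then [] else pvNibsAux f (n / 16) ++ [n % 16]

-- "{:4X}".format(start).replace(" ", "0") as the list of nibble values (Pre_ restricts to 0 ≤ start)
def pvNibs4 (start : Int) : List Nat :=
  let l := pvNibsAux (start.toNat + 1) start.toNat
  let l := if l = [] then [0] else l
  List.replicate (4 - l.length) 0 ++ l

-- bin(start): list of bits, most significant first
def pvBinAux : Nat → Nat → List Nat
  | 0, _ => []
  | f+1, n => if n = 0 then [] else pvBinAux f (n / 2) ++ [n % 2]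

-- bin(start).count("1")  (exact for 0 ≤ start; Pre_ excludes negatives, where Python A raises earlier anyway)
def pvBinCount (start : Int) : Int :=
  ((if start.toNat = 0 then [0] else pvBinAux (start.toNat + 1) start.toNat).count 1 : Nat)

-- "{}".format(k) for an int, as chars
def pvIstr (k : Int) : List Char := (PySem.Int.toStr k).toList

def pvHexAux : Nat → Nat → List Char
  | 0, _ => []
  | f+1, n => if n = 0 then [] else pvHexAux f (n / 16) ++ [Nat.digitChar (n % 16)]

-- "{:#x}".format(m) for m ≥ 0 (masks here are always ≥ 0)
def pvHexLit (m : Nat) : List Char := '0' :: 'x' :: (if m = 0 then ['0'] else pvHexAux (m + 1) m)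

-- the shared header: declaration line + one for-line per active bit
def pvHeader (numActive : Int) : List (List Char) :=
  ("uint16_t ".toList
    ++ List.intercalate ", ".toList ((PySem.List.pyRange 0 numActive 1).map (fun k => 'i' :: pvIstr k))
    ++ [';'])
  :: (PySem.List.pyRange 0 numActive 1).map (fun k =>
       "for (i".toList ++ pvIstr k ++ " = 0; i".toList ++ pvIstr k ++ " < 16; ++i".toList ++ pvIstr k ++ ") {".toList)

-- ===== PORT A =====
-- one iteration of A's `for i in range(4)` body; state = (lines, num_vars)
def pvStepA (nibs : List Nat) (numActive : Int) (st : List (List Char) × Int) (i : Nat) :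
    List (List Char) × Int :=
  let nib := nibs.getD i 0
  -- c = int(hex_str[i]): Python raises ValueError when the char is A–F (nib ≥ 10); Pre_ excludes that,
  -- the port just takes the nibble value there.
  let c : Int := (nib : Int)
  if c = 0 then st
  else
    let lines := st.1
    let numVars := st.2
    -- mask loop: tmp, mask over j in range(4)  (values are nonnegative; Nat ops are exact here)
    -- mask |= 15 << (4*j): the OR-ed nibble fields are disjoint, so OR is exactly addition here
    let mask := ((List.range 4).foldl (fun (tm : Nat × Nat) j =>
        (tm.1 / 2, if tm.1 % 2 = 0 then tm.2 + 15 * 16 ^ j else tm.2)) (nib, 0)).2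
    let line1 := "pt[".toList ++ pvIstr (i : Int) ++ "] &= ".toList ++ pvHexLit mask ++ [';']
    let j := numActive - numVars
    let (suffix, dec) : List Char × Int :=
      if c = 1 then ('i' :: pvIstr j, 1)
      else if c = 2 then ('i' :: pvIstr j ++ " << 4".toList, 1)
      else if c = 3 then ("(i".toList ++ pvIstr j ++ " << 4) | i".toList ++ pvIstr (j+1), 2)
      else if c = 4 then ('i' :: pvIstr j ++ " << 8".toList, 1)
      else if c = 5 then ("(i".toList ++ pvIstr j ++ " << 8) | i".toList ++ pvIstr (j+1), 2)
      else if c = 6 then ("(i".toList ++ pvIstr j ++ " << 8) | (i".toList ++ pvIstr (j+1) ++ " << 4)".toList, 2)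
      else if c = 7 then ("(i".toList ++ pvIstr j ++ " << 8) | (i".toList ++ pvIstr (j+1) ++ " << 4) | i".toList ++ pvIstr (j+2), 3)
      else if c = 8 then ('i' :: pvIstr j ++ " << 12".toList, 1)
      else if c = 9 then ("(i".toList ++ pvIstr j ++ " << 12) | i".toList ++ pvIstr (j+1), 2)
      else if c = 10 then ("(i".toList ++ pvIstr j ++ " << 12) | (i".toList ++ pvIstr (j+1) ++ " << 4)".toList, 2)
      else if c = 11 then ("(i".toList ++ pvIstr j ++ " << 12) | (i".toList ++ pvIstr (j+1) ++ " << 4) | i".toList ++ pvIstr (j+2), 3)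
      else if c = 12 then ("(i".toList ++ pvIstr j ++ " << 12) | (i".toList ++ pvIstr (j+1) ++ " << 8)".toList, 2)
      else if c = 13 then ("(i".toList ++ pvIstr j ++ " << 12) | (i".toList ++ pvIstr (j+1) ++ " << 8) | i".toList ++ pvIstr (j+2), 3)
      else if c = 14 then ("(i".toList ++ pvIstr j ++ " << 12) | (i".toList ++ pvIstr (j+1) ++ " << 8) | (i".toList ++ pvIstr (j+2) ++ " << 4)".toList, 3)
      else if c = 15 then ("(i".toList ++ pvIstr j ++ " << 12) | (i".toList ++ pvIstr (j+1) ++ " << 8) | (i".toList ++ pvIstr (j+2) ++ " << 4) | i".toList ++ pvIstr (j+3), 4)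
      else ([], 0)
    let line2 := "pt[".toList ++ pvIstr (i : Int) ++ "] |= ".toList ++ suffix ++ [';']
    (lines ++ [line1, line2], numVars - dec)

def gen_start_active_logic (start : Int) : String :=
  let nibs := pvNibs4 start
  let numActive := pvBinCount start
  let st := (List.range 4).foldl (pvStepA nibs numActive) (pvHeader numActive, numActive)
  String.ofList (List.intercalate ['\n'] (st.1.map (fun l => "    ".toList ++ l)))

-- ===== PORT B =====
-- one iteration of B's `for i in range(4)` body; state = (lines, n)
def pvStepB (nibs : List Nat) (st : List (List Char) × Int) (i : Nat) :
    List (List Char) × Int :=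
  let nib := nibs.getD i 0
  -- c = int(hex_str[i]); same ValueError note as in port A, excluded by Pre_
  let c : Int := (nib : Int)
  if c = 0 then st
  else
    let lines := st.1
    let n0 := st.2
    -- for p in (3, 2, 1, 0): collect (p, n) terms for set bits, build mask from clear bits
    -- (c >> p) & 1 is the p-th bit = c / 2^p mod 2; mask |= 15 << (4*p) adds a disjoint
    -- nibble field, so it is exactly + 15 * 16^p (values are nonnegative)
    let s := [3, 2, 1, 0].foldl (fun (s : Int × List (Nat × Int) × Nat) p =>
        if nib / 2 ^ p % 2 = 1 then (s.1 + 1, s.2.1 ++ [(p, s.1)], s.2.2)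
        else (s.1, s.2.1, s.2.2 + 15 * 16 ^ p)) (n0, [], 0)
    let n' := s.1
    let terms := s.2.1
    let mask := s.2.2
    let line1 := "pt[".toList ++ pvIstr (i : Int) ++ "] &= ".toList ++ pvHexLit mask ++ [';']
    let fmt := fun (pk : Nat × Int) =>
      let t := if pk.1 = 0 then 'i' :: pvIstr pk.2
               else 'i' :: pvIstr pk.2 ++ " << ".toList ++ pvIstr ((4 * pk.1 : Nat) : Int)
      if pk.1 ≠ 0 ∧ terms.length > 1 then '(' :: (t ++ [')']) else t
    let line2 := "pt[".toList ++ pvIstr (i : Int) ++ "] |= ".toList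
        ++ List.intercalate " | ".toList (terms.map fmt) ++ [';']
    (lines ++ [line1, line2], n')

def gen_start_active_logic_alt (start : Int) : String :=
  let nibs := pvNibs4 start
  let numActive := pvBinCount start
  let st := (List.range 4).foldl (pvStepB nibs) (pvHeader numActive, 0)
  String.ofList (List.intercalate ['\n'] (st.1.map (fun l => "    ".toList ++ l)))

-- ===== PRECONDITION & SPEC =====
-- Pre_ excludes exactly the inputs where Python A raises ValueError: negative start
-- ("{:4X}" then yields a '-' char that int() rejects) and inputs whose first four hex
-- chars contain a letter A–F (int() rejects those too).
def Pre_gen_start_active_logic (start : Int) : Prop :=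
  0 ≤ start ∧ ∀ k : Fin 4, (pvNibs4 start).getD k.1 0 ≤ 9
instance (start : Int) : Decidable (Pre_gen_start_active_logic start) := by
  unfold Pre_gen_start_active_logic; infer_instance

def pvWitness_gen_start_active_logic : Int := (4660)

def Spec_gen_start_active_logic (start : Int) (out : String) : Prop := out = gen_start_active_logic_alt start
instance (start : Int) (out : String) : Decidable (Spec_gen_start_active_logic start out) := by unfold Spec_gen_start_active_logic; infer_instance

-- ===== CLAIM (what is proved, stated in full; the proofs are below) =====
def Claim_equal_gen_start_active_logic : Prop := ∀ (start : Int), Dom_gen_start_active_logic start → Pre_gen_start_active_logic start → Spec_gen_start_active_logic start (gen_start_active_logic start)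

-- ===== LEMMAS AND PROOFS =====

-- one step preserves: equal line lists, and B's counter n = num_active − A's num_vars
set_option maxRecDepth 8000 in
theorem pvStep_rel_0 (nibs : List Nat) (a : Int) (i : Nat) (hnib : nibs.getD i 0 = 0)
    (L : List (List Char)) (v : Int) :
    (pvStepB nibs (L, a - v) i).1 = (pvStepA nibs a (L, v) i).1 ∧
    (pvStepB nibs (L, a - v) i).2 = a - (pvStepA nibs a (L, v) i).2 := by
  unfold pvStepA pvStepB
  rw [hnib]
  simp [pvIstr, pvHexLit, pvHexAux, List.range_succ, List.intercalate, List.intersperse,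
    Nat.digitChar, show PySem.Int.toChars 4 = ['4'] from by decide,
    show PySem.Int.toChars 8 = ['8'] from by decide,
    show PySem.Int.toChars 12 = ['1', '2'] from by decide]
  try constructor
  all_goals try omega
  all_goals (try (congr 1 <;> try omega))
  all_goals try omega

set_option maxRecDepth 8000 in
theorem pvStep_rel_1 (nibs : List Nat) (a : Int) (i : Nat) (hnib : nibs.getD i 0 = 1)
    (L : List (List Char)) (v : Int) :
    (pvStepB nibs (L, a - v) i).1 = (pvStepA nibs a (L, v) i).1 ∧
    (pvStepB nibs (L, a - v) i).2 = a - (pvStepA nibs a (L, v) i).2 := by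
  unfold pvStepA pvStepB
  rw [hnib]
  simp [pvIstr, pvHexLit, pvHexAux, List.range_succ, List.intercalate, List.intersperse,
    Nat.digitChar, show PySem.Int.toChars 4 = ['4'] from by decide,
    show PySem.Int.toChars 8 = ['8'] from by decide,
    show PySem.Int.toChars 12 = ['1', '2'] from by decide]
  try constructor
  all_goals try omega
  all_goals (try (congr 1 <;> try omega))
  all_goals try omega

set_option maxRecDepth 8000 in
theorem pvStep_rel_2 (nibs : List Nat) (a : Int) (i : Nat) (hnib : nibs.getD i 0 = 2)
    (L : List (List Char)) (v : Int) :
    (pvStepB nibs (L, a - v) i).1 = (pvStepA nibs a (L, v) i).1 ∧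
    (pvStepB nibs (L, a - v) i).2 = a - (pvStepA nibs a (L, v) i).2 := by
  unfold pvStepA pvStepB
  rw [hnib]
  simp [pvIstr, pvHexLit, pvHexAux, List.range_succ, List.intercalate, List.intersperse,
    Nat.digitChar, show PySem.Int.toChars 4 = ['4'] from by decide,
    show PySem.Int.toChars 8 = ['8'] from by decide,
    show PySem.Int.toChars 12 = ['1', '2'] from by decide]
  try constructor
  all_goals try omega
  all_goals (try (congr 1 <;> try omega))
  all_goals try omega

set_option maxRecDepth 8000 in
theorem pvStep_rel_3 (nibs : List Nat) (a : Int) (i : Nat) (hnib : nibs.getD i 0 = 3)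
    (L : List (List Char)) (v : Int) :
    (pvStepB nibs (L, a - v) i).1 = (pvStepA nibs a (L, v) i).1 ∧
    (pvStepB nibs (L, a - v) i).2 = a - (pvStepA nibs a (L, v) i).2 := by
  unfold pvStepA pvStepB
  rw [hnib]
  simp [pvIstr, pvHexLit, pvHexAux, List.range_succ, List.intercalate, List.intersperse,
    Nat.digitChar, show PySem.Int.toChars 4 = ['4'] from by decide,
    show PySem.Int.toChars 8 = ['8'] from by decide,
    show PySem.Int.toChars 12 = ['1', '2'] from by decide]
  try constructor
  all_goals try omega
  all_goals (try (congr 1 <;> try omega))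
  all_goals try omega

set_option maxRecDepth 8000 in
theorem pvStep_rel_4 (nibs : List Nat) (a : Int) (i : Nat) (hnib : nibs.getD i 0 = 4)
    (L : List (List Char)) (v : Int) :
    (pvStepB nibs (L, a - v) i).1 = (pvStepA nibs a (L, v) i).1 ∧
    (pvStepB nibs (L, a - v) i).2 = a - (pvStepA nibs a (L, v) i).2 := by
  unfold pvStepA pvStepB
  rw [hnib]
  simp [pvIstr, pvHexLit, pvHexAux, List.range_succ, List.intercalate, List.intersperse,
    Nat.digitChar, show PySem.Int.toChars 4 = ['4'] from by decide,
    show PySem.Int.toChars 8 = ['8'] from by decide,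
    show PySem.Int.toChars 12 = ['1', '2'] from by decide]
  try constructor
  all_goals try omega
  all_goals (try (congr 1 <;> try omega))
  all_goals try omega

set_option maxRecDepth 8000 in
theorem pvStep_rel_5 (nibs : List Nat) (a : Int) (i : Nat) (hnib : nibs.getD i 0 = 5)
    (L : List (List Char)) (v : Int) :
    (pvStepB nibs (L, a - v) i).1 = (pvStepA nibs a (L, v) i).1 ∧
    (pvStepB nibs (L, a - v) i).2 = a - (pvStepA nibs a (L, v) i).2 := by
  unfold pvStepA pvStepB
  rw [hnib]
  simp [pvIstr, pvHexLit, pvHexAux, List.range_succ, List.intercalate, List.intersperse,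
    Nat.digitChar, show PySem.Int.toChars 4 = ['4'] from by decide,
    show PySem.Int.toChars 8 = ['8'] from by decide,
    show PySem.Int.toChars 12 = ['1', '2'] from by decide]
  try constructor
  all_goals try omega
  all_goals (try (congr 1 <;> try omega))
  all_goals try omega

set_option maxRecDepth 8000 in
theorem pvStep_rel_6 (nibs : List Nat) (a : Int) (i : Nat) (hnib : nibs.getD i 0 = 6)
    (L : List (List Char)) (v : Int) :
    (pvStepB nibs (L, a - v) i).1 = (pvStepA nibs a (L, v) i).1 ∧
    (pvStepB nibs (L, a - v) i).2 = a - (pvStepA nibs a (L, v) i).2 := by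
  unfold pvStepA pvStepB
  rw [hnib]
  simp [pvIstr, pvHexLit, pvHexAux, List.range_succ, List.intercalate, List.intersperse,
    Nat.digitChar, show PySem.Int.toChars 4 = ['4'] from by decide,
    show PySem.Int.toChars 8 = ['8'] from by decide,
    show PySem.Int.toChars 12 = ['1', '2'] from by decide]
  try constructor
  all_goals try omega
  all_goals (try (congr 1 <;> try omega))
  all_goals try omega

set_option maxRecDepth 8000 in
theorem pvStep_rel_7 (nibs : List Nat) (a : Int) (i : Nat) (hnib : nibs.getD i 0 = 7)
    (L : List (List Char)) (v : Int) :
    (pvStepB nibs (L, a - v) i).1 = (pvStepA nibs a (L, v) i).1 ∧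
    (pvStepB nibs (L, a - v) i).2 = a - (pvStepA nibs a (L, v) i).2 := by
  unfold pvStepA pvStepB
  rw [hnib]
  simp [pvIstr, pvHexLit, pvHexAux, List.range_succ, List.intercalate, List.intersperse,
    Nat.digitChar, show PySem.Int.toChars 4 = ['4'] from by decide,
    show PySem.Int.toChars 8 = ['8'] from by decide,
    show PySem.Int.toChars 12 = ['1', '2'] from by decide]
  try constructor
  all_goals try omega
  all_goals (try (congr 1 <;> try omega))
  all_goals try omega

set_option maxRecDepth 8000 in
theorem pvStep_rel_8 (nibs : List Nat) (a : Int) (i : Nat) (hnib : nibs.getD i 0 = 8)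
    (L : List (List Char)) (v : Int) :
    (pvStepB nibs (L, a - v) i).1 = (pvStepA nibs a (L, v) i).1 ∧
    (pvStepB nibs (L, a - v) i).2 = a - (pvStepA nibs a (L, v) i).2 := by
  unfold pvStepA pvStepB
  rw [hnib]
  simp [pvIstr, pvHexLit, pvHexAux, List.range_succ, List.intercalate, List.intersperse,
    Nat.digitChar, show PySem.Int.toChars 4 = ['4'] from by decide,
    show PySem.Int.toChars 8 = ['8'] from by decide,
    show PySem.Int.toChars 12 = ['1', '2'] from by decide]
  try constructor
  all_goals try omega
  all_goals (try (congr 1 <;> try omega))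
  all_goals try omega

set_option maxRecDepth 8000 in
theorem pvStep_rel_9 (nibs : List Nat) (a : Int) (i : Nat) (hnib : nibs.getD i 0 = 9)
    (L : List (List Char)) (v : Int) :
    (pvStepB nibs (L, a - v) i).1 = (pvStepA nibs a (L, v) i).1 ∧
    (pvStepB nibs (L, a - v) i).2 = a - (pvStepA nibs a (L, v) i).2 := by
  unfold pvStepA pvStepB
  rw [hnib]
  simp [pvIstr, pvHexLit, pvHexAux, List.range_succ, List.intercalate, List.intersperse,
    Nat.digitChar, show PySem.Int.toChars 4 = ['4'] from by decide,
    show PySem.Int.toChars 8 = ['8'] from by decide,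
    show PySem.Int.toChars 12 = ['1', '2'] from by decide]
  try constructor
  all_goals try omega
  all_goals (try (congr 1 <;> try omega))
  all_goals try omega

theorem pvStep_rel (nibs : List Nat) (a : Int) (i : Nat) (hnib : nibs.getD i 0 ≤ 9)
    (L : List (List Char)) (v : Int) :
    (pvStepB nibs (L, a - v) i).1 = (pvStepA nibs a (L, v) i).1 ∧
    (pvStepB nibs (L, a - v) i).2 = a - (pvStepA nibs a (L, v) i).2 := by
  have h : nibs.getD i 0 = 0 ∨ nibs.getD i 0 = 1 ∨ nibs.getD i 0 = 2 ∨ nibs.getD i 0 = 3 ∨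
      nibs.getD i 0 = 4 ∨ nibs.getD i 0 = 5 ∨ nibs.getD i 0 = 6 ∨ nibs.getD i 0 = 7 ∨
      nibs.getD i 0 = 8 ∨ nibs.getD i 0 = 9 := by omega
  rcases h with h|h|h|h|h|h|h|h|h|h
  exacts [pvStep_rel_0 nibs a i h L v, pvStep_rel_1 nibs a i h L v, pvStep_rel_2 nibs a i h L v,
    pvStep_rel_3 nibs a i h L v, pvStep_rel_4 nibs a i h L v, pvStep_rel_5 nibs a i h L v,
    pvStep_rel_6 nibs a i h L v, pvStep_rel_7 nibs a i h L v, pvStep_rel_8 nibs a i h L v,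
    pvStep_rel_9 nibs a i h L v]

-- fold the relation over any index list with digit nibbles
theorem pvFold_rel (nibs : List Nat) (a : Int) (is : List Nat)
    (h : ∀ i ∈ is, nibs.getD i 0 ≤ 9) :
    ∀ (L : List (List Char)) (v : Int),
      (is.foldl (pvStepB nibs) (L, a - v)).1 = (is.foldl (pvStepA nibs a) (L, v)).1 := by
  induction is with
  | nil => intro L v; rfl
  | cons i is ih =>
    intro L v
    have hi := h i (List.mem_cons_self ..)
    have hrest : ∀ j ∈ is, nibs.getD j 0 ≤ 9 := fun j hj => h j (List.mem_cons_of_mem _ hj)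
    obtain ⟨h1, h2⟩ := pvStep_rel nibs a i hi L v
    simp only [List.foldl_cons]
    have : pvStepB nibs (L, a - v) i
        = ((pvStepA nibs a (L, v) i).1, a - (pvStepA nibs a (L, v) i).2) := by
      cases hB : pvStepB nibs (L, a - v) i
      simp_all
    rw [this]
    exact ih hrest (pvStepA nibs a (L, v) i).1 (pvStepA nibs a (L, v) i).2

-- ===== VERDICT (by name: the statement is the Claim_ definition above) =====
theorem gen_start_active_logic_spec : Claim_equal_gen_start_active_logic := by
  intro start _ hpre
  obtain ⟨hnn, hdig⟩ := hpre
  unfold Spec_gen_start_active_logic gen_start_active_logic gen_start_active_logic_alt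
  have h : ∀ i ∈ List.range 4, (pvNibs4 start).getD i 0 ≤ 9 := by
    intro i hi
    have : i < 4 := List.mem_range.mp hi
    exact hdig ⟨i, this⟩
  have := pvFold_rel (pvNibs4 start) (pvBinCount start) (List.range 4) h
      (pvHeader (pvBinCount start)) (pvBinCount start)
  simp only [sub_self] at this
  simp only [this]
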